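-- pv_equiv track=rewrite | github.com/whitegreyblack/Spaceship | spaceship/maps/map_configs.py | create_empty_room
-- ===== SOURCE A (Python) =====
-- def create_empty_room(width: int, height: int):
--     room = []
--     for h in range(height):
--         if h in (0, height - 1):
--             row = '#' * width
--         else:
--             row = '#' + '.' * (width - 2) + '#'
--         room.append(row)
--     return '\n'.join(room)
-- ===== SOURCE B (Python) =====
-- def create_empty_room(width: int, height: int):
--     if height <= 0:
--         return ''
--     w = max(width, 0)
--     stride = w + 1
--     buf = bytearray(b'.' * (height * stride))          # dot canvas, one slot per cell plus a row terminator
--     buf[w::stride] = b'\n' * height                    # row terminators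
--     buf[0:w] = b'#' * w                                # top border
--     buf[(height - 1) * stride:(height - 1) * stride + w] = b'#' * w   # bottom border
--     if w >= 1:
--         buf[0::stride] = b'#' * height                 # left wall
--         buf[w - 1::stride] = b'#' * height             # right wall
--     return buf[:-1].decode()
-- ===== Notes on version B (the rewrite author's own statement) =====
-- stated objective: alternative
-- what changed: B allocates one flat dot canvas and stamps the row terminators, the top/bottom borders and the left/right walls onto it with strided and contiguous slice overwrites, instead of A's per-row string construction by repetition joined with newlines.
-- intended difference: For width <= 1 with height >= 3, A's interior rows are always '##' (wider than the room, an artefact of '#'+''+'#'), while B gives every row exactly width characters of '#', which is the intended degenerate rectangle. — e.g. on create_empty_room(1, 3): A returns "#\n##\n#", B returns "#\n#\n#"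
import Mathlib
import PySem

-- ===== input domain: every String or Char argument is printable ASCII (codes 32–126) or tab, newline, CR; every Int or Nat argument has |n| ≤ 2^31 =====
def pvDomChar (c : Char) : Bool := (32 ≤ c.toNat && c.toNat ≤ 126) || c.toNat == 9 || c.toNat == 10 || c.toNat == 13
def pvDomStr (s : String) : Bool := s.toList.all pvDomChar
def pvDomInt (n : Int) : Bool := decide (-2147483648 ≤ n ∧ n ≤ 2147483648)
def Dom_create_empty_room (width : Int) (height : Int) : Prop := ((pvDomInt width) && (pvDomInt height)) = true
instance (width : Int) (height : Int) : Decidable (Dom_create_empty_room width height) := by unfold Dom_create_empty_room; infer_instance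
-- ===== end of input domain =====

-- B allocates a flat dot canvas and stamps the row terminators and walls onto it with
-- strided/contiguous slice overwrites, instead of A's per-row string building joined
-- with newlines (objective: alternative); on width ≤ 1 with height ≥ 3 B returns the
-- intended width-wide rows (see D_ below).

-- ===== PORT A =====
-- '#' * width  (Python string repetition; '' for width ≤ 0)
def pvHashes (width : Int) : String := String.ofList (List.replicate width.toNat '#')
-- '#' + '.' * (width - 2) + '#'
def pvMiddle (width : Int) : String := String.ofList ('#' :: (List.replicate (width - 2).toNat '.' ++ ['#']))

def create_empty_room (width : Int) (height : Int) : String :=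
  let room : List String :=
    (PySem.List.pyRange 0 height 1).foldl
      (fun room h =>
        let row := if h = 0 ∨ h = height - 1 then pvHashes width else pvMiddle width
        room ++ [row])
      []
  PySem.Str.join "\n" room

-- ===== PORT B =====
-- Python's buf[a::k] = c * len(slice): the assigned bytes are one constant char and their
-- number equals the slice's length exactly, so the assignment is a pointwise overwrite of
-- the selected indices; pvStampStride / pvStampRange are exact on those uses.
def pvStampStride (buf : List Char) (a k : Nat) (c : Char) : List Char :=
  buf.mapIdx (fun i x => if a ≤ i ∧ (i - a) % k = 0 then c else x)
-- Python's buf[a:b] = c * (b - a) with 0 ≤ a ≤ b ≤ len(buf) (as in Source B): pointwise overwrite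
def pvStampRange (buf : List Char) (a b : Nat) (c : Char) : List Char :=
  buf.mapIdx (fun i x => if a ≤ i ∧ i < b then c else x)

-- the canvas after the newline stamp, the two border-row stamps and (if w ≥ 1) the two wall stamps
def pvStamped3 (w h : Nat) : List Char :=
  pvStampRange
    (pvStampRange
      (pvStampStride (List.replicate (h * (w + 1)) '.') w (w + 1) '\n')
      0 w '#')
    ((h - 1) * (w + 1)) ((h - 1) * (w + 1) + w) '#'
def pvBufFinal (w h : Nat) : List Char :=
  if 1 ≤ w then pvStampStride (pvStampStride (pvStamped3 w h) 0 (w + 1) '#') (w - 1) (w + 1) '#'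
  else pvStamped3 w h

-- max(width, 0) = width.toNat; buf[:-1] = dropLast
def create_empty_room_alt (width : Int) (height : Int) : String :=
  if height ≤ 0 then "" else
  String.ofList (pvBufFinal width.toNat height.toNat).dropLast

-- ===== PRECONDITION & SPEC =====
-- For width ≤ 1 with height ≥ 3, A's interior rows are always '##' (wider than the room,
-- an artefact of '#'+''+'#'); B gives every row exactly width characters of '#',
-- the intended degenerate rectangle.
def D_create_empty_room (width : Int) (height : Int) : Prop := width ≤ 1 ∧ 3 ≤ height
instance (width : Int) (height : Int) : Decidable (D_create_empty_room width height) := by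
  unfold D_create_empty_room; infer_instance

def Spec_create_empty_room (width : Int) (height : Int) (out : String) : Prop :=
  ¬ D_create_empty_room width height → out = create_empty_room_alt width height
instance (width : Int) (height : Int) (out : String) : Decidable (Spec_create_empty_room width height out) := by
  unfold Spec_create_empty_room; infer_instance

def pvDiffWitness_create_empty_room : Int × Int := (1, 3)
def pvDiffWitnessOut_create_empty_room : String × String := ("#\n##\n#", "#\n#\n#")

-- ===== CLAIM (what is proved, stated in full; the proofs are below) =====
def Claim_unchanged_create_empty_room : Prop := ∀ (width : Int) (height : Int), Dom_create_empty_room width height → Spec_create_empty_room width height (create_empty_room width height)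
def Claim_changed_create_empty_room : Prop := Dom_create_empty_room (pvDiffWitness_create_empty_room.1) (pvDiffWitness_create_empty_room.2) ∧ D_create_empty_room (pvDiffWitness_create_empty_room.1) (pvDiffWitness_create_empty_room.2) ∧ create_empty_room (pvDiffWitness_create_empty_room.1) (pvDiffWitness_create_empty_room.2) = pvDiffWitnessOut_create_empty_room.1 ∧ create_empty_room_alt (pvDiffWitness_create_empty_room.1) (pvDiffWitness_create_empty_room.2) = pvDiffWitnessOut_create_empty_room.2 ∧ pvDiffWitnessOut_create_empty_room.1 ≠ pvDiffWitnessOut_create_empty_room.2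
def Claim_exact_create_empty_room : Prop := ∀ (width : Int) (height : Int), Dom_create_empty_room width height → D_create_empty_room width height → create_empty_room width height ≠ create_empty_room_alt width height

-- ===== LEMMAS AND PROOFS =====

-- a top/bottom border block of the canvas: w hashes and the row terminator
def pvTopB (w : Nat) : List Char := List.replicate w '#' ++ ['\n']
-- an unstamped interior block: w dots and the row terminator
def pvBlk1 (w : Nat) : List Char := List.replicate w '.' ++ ['\n']
-- a finished interior block (only reached with w ≥ 2)
def pvMidB (w : Nat) : List Char := '#' :: (List.replicate (w - 2) '.' ++ ['#', '\n'])

theorem pv_foldl_append {α β : Type} (f : α → β) :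
    ∀ (xs : List α) (init : List β),
      xs.foldl (fun acc h => acc ++ [f h]) init = init ++ xs.map f := by
  intro xs
  induction xs with
  | nil => intro init; simp
  | cons x xs ih => intro init; simp [List.foldl_cons, ih]

theorem pv_rows_eq (width height : Int) :
    (PySem.List.pyRange 0 height 1).map
        (fun h => if h = 0 ∨ h = height - 1 then pvHashes width else pvMiddle width)
      = (if height ≤ 0 then []
         else if height = 1 then [pvHashes width]
         else [pvHashes width] ++ List.replicate (height - 2).toNat (pvMiddle width) ++ [pvHashes width]) := by
  by_cases h0 : height ≤ 0
  · rw [PySem.List.pyRange_one_eq_nil (by omega)]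
    simp [h0]
  · by_cases h1 : height = 1
    · subst h1
      rw [PySem.List.pyRange_one_cons (by norm_num), PySem.List.pyRange_one_eq_nil (by norm_num)]
      simp
    · simp only [if_neg h0, if_neg h1]
      have h2 : 2 ≤ height := by omega
      have hmid : (PySem.List.pyRange 1 (height - 1) 1).map
          (fun h => if h = 0 ∨ h = height - 1 then pvHashes width else pvMiddle width)
          = List.replicate (height - 2).toNat (pvMiddle width) := by
        have hc : ∀ h ∈ PySem.List.pyRange 1 (height - 1) 1,
            (if h = 0 ∨ h = height - 1 then pvHashes width else pvMiddle width) = pvMiddle width := by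
          intro h hm
          rw [PySem.List.mem_pyRange_one] at hm
          have : ¬ (h = 0 ∨ h = height - 1) := by omega
          simp [this]
        rw [List.map_congr_left hc, List.map_const']
        rw [PySem.List.length_pyRange_one]
        congr 1
        omega
      have h01 : (0 : Int) + 1 = 1 := by norm_num
      rw [PySem.List.pyRange_one_cons (show (0 : Int) < height by omega), h01,
          PySem.List.pyRange_one_append (a := 1) (m := height - 1) (b := height) (by omega) (by omega),
          PySem.List.pyRange_one_cons (a := height - 1) (b := height) (by omega),
          PySem.List.pyRange_one_eq_nil (a := height - 1 + 1) (b := height) (by omega)]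
      simp only [List.map_cons, List.map_append, List.map_nil]
      rw [hmid]
      simp

-- '\n'.join over char-list rows = flatten of newline-terminated blocks minus the last terminator
theorem pv_join_blocks :
    ∀ (rs : List (List Char)), rs ≠ [] →
      PySem.Chars.join ['\n'] rs = (List.flatten (rs.map (fun r => r ++ ['\n']))).dropLast := by
  intro rs
  induction rs with
  | nil => intro h; exact absurd rfl h
  | cons r rs ih =>
      intro _
      cases rs with
      | nil => simp [PySem.Chars.join_singleton]
      | cons q qs =>
          rw [PySem.Chars.join_cons_cons, ih (by simp)]
          rw [show (List.map (fun r => r ++ ['\n']) (r :: q :: qs))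
                = (r ++ ['\n']) :: List.map (fun r => r ++ ['\n']) (q :: qs) from rfl]
          rw [List.flatten_cons, List.dropLast_append, if_neg (by simp)]

-- ------- stamp lemmas -------

theorem pv_stampRange_zero (l : List Char) (a : Nat) (c : Char) :
    pvStampRange l a 0 c = l := by
  unfold pvStampRange
  apply List.ext_getElem (by simp)
  intro i h1 h2
  simp

theorem pv_stampRange_skip (l : List Char) (a b : Nat) (c : Char) (h : l.length ≤ a) :
    pvStampRange l a b c = l := by
  unfold pvStampRange
  apply List.ext_getElem (by simp)
  intro i h1 h2
  have : ¬ (a ≤ i) := by omega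
  simp [this]

theorem pv_stampRange_append (l1 l2 : List Char) (a b : Nat) (c : Char) :
    pvStampRange (l1 ++ l2) a b c
      = pvStampRange l1 a b c ++ pvStampRange l2 (a - l1.length) (b - l1.length) c := by
  unfold pvStampRange
  rw [List.mapIdx_append]
  congr 1
  apply List.ext_getElem (by simp)
  intro i h1 h2
  simp only [List.getElem_mapIdx]
  have : (a ≤ i + l1.length ∧ i + l1.length < b) ↔ (a - l1.length ≤ i ∧ i < b - l1.length) := by
    omega
  rw [if_congr this rfl rfl]

theorem pv_stampRange_replicate (w : Nat) (x c : Char) :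
    pvStampRange (List.replicate w x) 0 w c = List.replicate w c := by
  unfold pvStampRange
  apply List.ext_getElem (by simp)
  intro i h1 h2
  have hi : i < w := by simpa using h2
  simp [hi]

theorem pv_stampRange_top (w : Nat) (x c : Char) (l : List Char) :
    pvStampRange (List.replicate w x ++ l) 0 w c = List.replicate w c ++ l := by
  rw [pv_stampRange_append, pv_stampRange_replicate]
  simp [pv_stampRange_zero]

theorem pv_stampStride_set (l : List Char) (a k : Nat) (c : Char) (_ : a < k)
    (hl : l.length = k) :
    pvStampStride l a k c = l.set a c := by
  unfold pvStampStride
  apply List.ext_getElem (by simp)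
  intro i h1 h2
  have hik : i < k := by
    simp only [List.length_mapIdx, hl] at h1
    exact h1
  simp only [List.getElem_mapIdx, List.getElem_set]
  by_cases hia : a = i
  · subst hia; simp
  · have hcond : ¬ (a ≤ i ∧ (i - a) % k = 0) := by
      rintro ⟨hle, hmod⟩
      rw [Nat.mod_eq_of_lt (by omega)] at hmod
      omega
    simp [hcond, hia]

-- a strided stamp restricted to a block of length k overwrites exactly position a of it;
-- hence passing one block shifts the stamp unchanged onto the rest
theorem pv_stampStride_shift (l : List Char) (a k n : Nat) (c : Char) (ha : a < k) (hn : n = k) :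
    List.mapIdx (fun i x => if a ≤ i + n ∧ (i + n - a) % k = 0 then c else x) l
      = pvStampStride l a k c := by
  subst hn
  unfold pvStampStride
  apply List.ext_getElem (by simp)
  intro i h1 h2
  simp only [List.getElem_mapIdx]
  have hiff : (a ≤ i + n ∧ (i + n - a) % n = 0) ↔ (a ≤ i ∧ (i - a) % n = 0) := by
    constructor
    · rintro ⟨_, hmod⟩
      by_cases hai : a ≤ i
      · refine ⟨hai, ?_⟩
        rw [show i + n - a = (i - a) + n by omega, Nat.add_mod_right] at hmod
        exact hmod
      · exfalso
        have hlt : i + n - a < n := by omega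
        rw [Nat.mod_eq_of_lt hlt] at hmod
        omega
    · rintro ⟨hai, hmod⟩
      refine ⟨by omega, ?_⟩
      rw [show i + n - a = (i - a) + n by omega, Nat.add_mod_right]
      exact hmod
  rw [if_congr hiff rfl rfl]

theorem pv_stampStride_flatten (k a : Nat) (c : Char) (ha : a < k) :
    ∀ (bs : List (List Char)), (∀ b ∈ bs, b.length = k) →
      pvStampStride bs.flatten a k c = (bs.map (fun b => b.set a c)).flatten := by
  intro bs
  induction bs with
  | nil => intro _; rfl
  | cons b bs ih =>
      intro hlen
      have hb : b.length = k := hlen b (List.mem_cons_self ..)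
      rw [List.flatten_cons, List.map_cons, List.flatten_cons]
      unfold pvStampStride
      rw [List.mapIdx_append]
      congr 1
      · rw [← pvStampStride, pv_stampStride_set b a k c ha hb]
      · rw [pv_stampStride_shift bs.flatten a k b.length c ha hb,
            ih (fun q hq => hlen q (List.mem_cons_of_mem _ hq))]

theorem pv_replicate_flatten (k h : Nat) (c : Char) :
    List.replicate (h * k) c = (List.replicate h (List.replicate k c)).flatten := by
  induction h with
  | zero => simp
  | succ h ih =>
      rw [show (h + 1) * k = k + h * k by ring, List.replicate_add,
          List.replicate_succ, List.flatten_cons, ih]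

theorem pv_set_replicate_last (w : Nat) (x c : Char) :
    (List.replicate (w + 1) x).set w c = List.replicate w x ++ [c] := by
  apply List.ext_getElem (by simp)
  intro i h1 h2
  have hiw1 : i < w + 1 := by simpa using h1
  simp only [List.getElem_set, List.getElem_append, List.getElem_replicate,
    List.length_replicate]
  by_cases hwi : w = i
  · subst hwi
    simp
  · have hi : i < w := by omega
    simp [hwi, hi]

theorem pv_set_self (w a : Nat) (c : Char) (l : List Char) (ha : a < w) :
    (List.replicate w c ++ l).set a c = List.replicate w c ++ l := by
  apply List.ext_getElem (by simp)
  intro i h1 h2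
  simp only [List.getElem_set]
  split_ifs with hai
  · subst hai
    simp [ha]
  · rfl

theorem pv_dots_set (m : Nat) :
    ('.' :: (List.replicate m '.' ++ ['\n'])).set m '#' = List.replicate m '.' ++ ['#', '\n'] := by
  induction m with
  | zero => rfl
  | succ m ih =>
      rw [List.replicate_succ, List.cons_append, List.set_cons_succ, ih]
      simp

theorem pv_mid_set (w : Nat) (hw : 2 ≤ w) :
    ((pvBlk1 w).set 0 '#').set (w - 1) '#' = pvMidB w := by
  unfold pvBlk1 pvMidB
  rw [show w = (w - 2) + 1 + 1 by omega]
  simp only [List.replicate_succ, List.cons_append, List.set_cons_zero,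
    Nat.add_sub_cancel]
  rw [List.set_cons_succ]
  rw [show (w - 2) + 1 + 1 - 2 = w - 2 by omega]
  rw [pv_dots_set (w - 2)]

theorem pv_flatten_replicate_length (n : Nat) (l : List Char) :
    ((List.replicate n l).flatten).length = n * l.length := by
  simp [List.length_flatten, List.map_replicate, List.sum_replicate]

theorem pv_stamped3_eq (w h : Nat) (h1 : 1 ≤ h) :
    pvStamped3 w h
      = ([pvTopB w] ++ List.replicate (h - 2) (pvBlk1 w)
          ++ if 2 ≤ h then [pvTopB w] else []).flatten := by
  unfold pvStamped3
  rw [pv_replicate_flatten (w + 1) h '.',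
      pv_stampStride_flatten (w + 1) w '\n' (by omega) _
        (by intro b hb; rw [List.eq_of_mem_replicate hb]; simp),
      List.map_replicate, pv_set_replicate_last]
  obtain ⟨h', rfl⟩ : ∃ h', h = h' + 1 := ⟨h - 1, by omega⟩
  rw [List.replicate_succ, List.flatten_cons, ← pvBlk1]
  rw [show pvStampRange (pvBlk1 w ++ (List.replicate h' (pvBlk1 w)).flatten) 0 w '#'
        = pvTopB w ++ (List.replicate h' (pvBlk1 w)).flatten by
      unfold pvBlk1 pvTopB
      rw [pv_stampRange_append, pv_stampRange_top]
      simp [pv_stampRange_zero]]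
  rcases Nat.eq_zero_or_pos h' with h'0 | h'pos
  · subst h'0
    simp only [List.replicate_zero, List.flatten_nil, List.append_nil]
    norm_num
    unfold pvTopB
    rw [pv_stampRange_top]
  · obtain ⟨h'', rfl⟩ : ∃ h'', h' = h'' + 1 := ⟨h' - 1, by omega⟩
    simp only [Nat.add_sub_cancel]
    have hlen1 : (pvTopB w).length = w + 1 := by unfold pvTopB; simp
    have hlen2 : ((List.replicate h'' (pvBlk1 w)).flatten).length = h'' * (w + 1) := by
      rw [pv_flatten_replicate_length]; unfold pvBlk1; simp
    have hmul : (h'' + 1) * (w + 1) = h'' * (w + 1) + (w + 1) := by ring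
    rw [pv_stampRange_append]
    rw [pv_stampRange_skip _ _ _ _ (by rw [hlen1]; omega)]
    rw [List.replicate_succ' (n := h''), List.flatten_append]
    rw [pv_stampRange_append]
    rw [pv_stampRange_skip _ _ _ _ (by rw [hlen2, hlen1]; omega)]
    have ha : (h'' + 1) * (w + 1) + w - (pvTopB w).length
        - ((List.replicate h'' (pvBlk1 w)).flatten).length = w := by
      rw [hlen1, hlen2]; omega
    have ha0 : (h'' + 1) * (w + 1) - (pvTopB w).length
        - ((List.replicate h'' (pvBlk1 w)).flatten).length = 0 := by
      rw [hlen1, hlen2]; omega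
    rw [ha, ha0]
    rw [show List.flatten [pvBlk1 w] = List.replicate w '.' ++ ['\n'] by simp [pvBlk1]]
    rw [pv_stampRange_top]
    simp [pvTopB, List.flatten_append]

theorem pv_buf_eq (w h : Nat) (h1 : 1 ≤ h) (hcase : 2 ≤ w ∨ h ≤ 2) :
    pvBufFinal w h
      = ([pvTopB w] ++ List.replicate (h - 2) (pvMidB w)
          ++ if 2 ≤ h then [pvTopB w] else []).flatten := by
  have hs3 := pv_stamped3_eq w h h1
  unfold pvBufFinal
  by_cases hw1 : 1 ≤ w
  · rw [if_pos hw1, hs3]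
    have hblocks : ∀ b ∈ ([pvTopB w] ++ List.replicate (h - 2) (pvBlk1 w)
        ++ if 2 ≤ h then [pvTopB w] else []), b.length = w + 1 := by
      intro b hb
      simp only [List.mem_append, List.mem_singleton, List.mem_replicate] at hb
      rcases hb with (hb | hb) | hb
      · subst hb; simp [pvTopB]
      · rw [hb.2]; simp [pvBlk1]
      · split_ifs at hb
        · simp only [List.mem_singleton] at hb; subst hb; simp [pvTopB]
        · simp at hb
    rw [pv_stampStride_flatten (w + 1) 0 '#' (by omega) _ hblocks]
    rw [pv_stampStride_flatten (w + 1) (w - 1) '#' (by omega) _ (by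
      intro b hb
      simp only [List.mem_map] at hb
      obtain ⟨q, hq, rfl⟩ := hb
      rw [List.length_set]
      exact hblocks q hq)]
    rw [List.map_map]
    congr 1
    simp only [List.map_append, List.map_replicate, List.map_cons, List.map_nil,
      Function.comp_def]
    have htop : ((pvTopB w).set 0 '#').set (w - 1) '#' = pvTopB w := by
      unfold pvTopB
      rw [pv_set_self w 0 '#' _ (by omega), pv_set_self w (w - 1) '#' _ (by omega)]
    rw [htop]
    congr 1
    · congr 1
      rcases Nat.lt_or_ge h 3 with hh3 | hh3
      · rw [show h - 2 = 0 by omega]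
        simp
      · have hw2 : 2 ≤ w := by
          rcases hcase with hc | hc
          · exact hc
          · omega
        rw [pv_mid_set w hw2]
    · split_ifs with hh2
      · simp [htop]
      · simp
  · rw [if_neg hw1, hs3]
    have hw0 : w = 0 := by omega
    have hh2 : h ≤ 2 := by
      rcases hcase with hc | hc
      · omega
      · exact hc
    rw [show h - 2 = 0 by omega]
    simp

-- the two sides as character lists
theorem pv_B_toList (width height : Int) (h1 : 1 ≤ height) :
    (create_empty_room_alt width height).toList
      = (pvBufFinal width.toNat height.toNat).dropLast := by
  unfold create_empty_room_alt
  rw [if_neg (by omega)]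
  simp

theorem pv_A_toList (width height : Int) (h2 : 2 ≤ height) :
    (create_empty_room width height).toList
      = (List.flatten (([pvHashes width] ++ List.replicate (height - 2).toNat (pvMiddle width)
            ++ [pvHashes width]).map (fun r => r.toList ++ ['\n']))).dropLast := by
  unfold create_empty_room
  simp only []
  rw [pv_foldl_append (fun r => if r = 0 ∨ r = height - 1 then pvHashes width else pvMiddle width)
        (PySem.List.pyRange 0 height 1) [], List.nil_append, pv_rows_eq,
      if_neg (by omega : ¬ height ≤ 0), if_neg (by omega : ¬ height = 1),
      PySem.Str.toList_join]
  rw [show ("\n" : String).toList = ['\n'] from rfl]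
  rw [pv_join_blocks _ (by simp)]
  rw [List.map_map]
  rfl

-- ===== VERDICT (by name: the statements are the Claim_ definitions above) =====
theorem create_empty_room_spec : Claim_unchanged_create_empty_room := by
  intro width height _ hD
  by_cases h0 : height ≤ 0
  · unfold create_empty_room create_empty_room_alt
    simp only []
    rw [pv_foldl_append (fun r => if r = 0 ∨ r = height - 1 then pvHashes width else pvMiddle width)
          (PySem.List.pyRange 0 height 1) [], List.nil_append, pv_rows_eq, if_pos h0,
        if_pos h0]
    simp [PySem.Str.join]
  · by_cases hh1 : height = 1
    · subst hh1
      unfold create_empty_room create_empty_room_alt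
      simp only []
      rw [pv_foldl_append (fun r => if r = 0 ∨ r = (1:Int) - 1 then pvHashes width else pvMiddle width)
            (PySem.List.pyRange 0 1 1) [], List.nil_append, pv_rows_eq,
          if_neg (by omega : ¬ (1:Int) ≤ 0), if_pos rfl, if_neg (by omega : ¬ (1:Int) ≤ 0)]
      rw [show ((1:Int)).toNat = 1 from rfl, pv_buf_eq width.toNat 1 (by omega) (by omega)]
      rw [if_neg (by omega : ¬ 2 ≤ 1)]
      unfold PySem.Str.join
      congr 1
      rw [show ("\n" : String).toList = ['\n'] from rfl]
      simp [PySem.Chars.join_singleton, pvTopB, pvHashes]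
    · -- height ≥ 2
      have h2 : 2 ≤ height := by omega
      have heq : (create_empty_room width height).toList
          = (create_empty_room_alt width height).toList := by
        rw [pv_A_toList width height h2, pv_B_toList width height (by omega)]
        rw [pv_buf_eq width.toNat height.toNat (by omega)
              (by unfold D_create_empty_room at hD; omega)]
        have hrep : List.replicate (height - 2).toNat ((pvMiddle width).toList ++ ['\n'])
            = List.replicate (height.toNat - 2) (pvMidB width.toNat) := by
          rcases Nat.lt_or_ge height.toNat 3 with hh3 | hh3
          · rw [show (height - 2).toNat = 0 by omega, show height.toNat - 2 = 0 by omega]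
            simp
          · have hw2 : (2:Int) ≤ width := by unfold D_create_empty_room at hD; omega
            rw [show (height - 2).toNat = height.toNat - 2 by omega]
            congr 1
            simp only [pvMiddle, pvMidB, String.toList_ofList]
            rw [show (width - 2).toNat = width.toNat - 2 by omega]
            simp
        have htop : (pvHashes width).toList ++ ['\n'] = pvTopB width.toNat := by
          simp [pvHashes, pvTopB]
        simp only [List.map_append, List.map_replicate, List.map_cons, List.map_nil,
          htop, hrep, if_pos (show 2 ≤ height.toNat by omega)]
      calc create_empty_room width height
          = String.ofList (create_empty_room width height).toList := by
            rw [String.ofList_toList]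
        _ = String.ofList (create_empty_room_alt width height).toList := by rw [heq]
        _ = create_empty_room_alt width height := by rw [String.ofList_toList]

theorem create_empty_room_changed : Claim_changed_create_empty_room := by
  unfold Claim_changed_create_empty_room; decide

theorem create_empty_room_tight : Claim_exact_create_empty_room := by
  intro width height _ hD
  unfold D_create_empty_room at hD
  obtain ⟨hw, hh⟩ := hD
  intro heq
  have heq' := congrArg List.length (congrArg String.toList heq)
  rw [pv_A_toList width height (by omega), pv_B_toList width height (by omega)] at heq'
  have hlb : (pvBufFinal width.toNat height.toNat).length
      = height.toNat * (width.toNat + 1) := by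
    unfold pvBufFinal pvStamped3 pvStampStride pvStampRange
    split_ifs <;> simp [List.length_mapIdx]
  have hmidlen : (pvMiddle width).toList.length = 2 := by
    simp [pvMiddle, show (width - 2).toNat = 0 by omega]
  rw [List.length_dropLast, List.length_dropLast, hlb, List.length_flatten,
      List.map_map, List.map_append, List.map_append, List.map_replicate] at heq'
  simp only [List.map_cons, List.map_nil, Function.comp_def, List.length_append,
    List.length_cons, List.length_nil, hmidlen, List.sum_append, List.sum_cons,
    List.sum_nil, List.sum_replicate, smul_eq_mul, pvHashes, String.toList_ofList,
    List.length_replicate] at heq'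
  rw [show (height - 2).toNat = height.toNat - 2 by omega] at heq'
  have ht : width.toNat = 0 ∨ width.toNat = 1 := by omega
  rcases ht with ht | ht <;> rw [ht] at heq' <;> omega
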